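-- pv_equiv track=rewrite | github.com/wmontanaro/ProjectEuler | Problem0001.py | get_multiples_of_k_and_l_below_m
-- ===== SOURCE A (Python) =====
-- def get_multiples_of_x_below_y(x, y):
--     multiples = set()
--     for i in range(1, y):
--         if i % x == 0:
--             multiples.add(i)
--     return multiples
--
-- def get_multiples_of_k_and_l_below_m(k, l, m):
--     mult_of_k = get_multiples_of_x_below_y(k, m)
--     mult_of_l = get_multiples_of_x_below_y(l, m)
--     all_multiples = mult_of_k.union(mult_of_l)
--     result_sum = 0
--     for item in all_multiples:
--         result_sum += item
--     return result_sum
-- ===== SOURCE B (Python) =====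
-- def get_multiples_of_k_and_l_below_m(k, l, m):
--     # O(1): inclusion-exclusion with the arithmetic-series formula.
--     t = m - 1 if m > 1 else 0
--     a, b = abs(k), abs(l)
--     g, x = a, b
--     while x:
--         g, x = x, g % x
--
--     def tri(d):
--         n = t // d
--         return d * n * (n + 1) // 2
--
--     return tri(a) + tri(b) - tri(a * b // g)
-- ===== Notes on version B (the rewrite author's own statement) =====
-- stated objective: faster
-- what changed: Replaced the O(m) scan that builds two sets of multiples and sums their union with an O(1) inclusion-exclusion computation: the arithmetic-series formula for multiples of |k|, |l|, minus multiples of lcm(|k|,|l|) computed via Euclid's gcd.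
-- outside the precondition, e.g. on get_multiples_of_k_and_l_below_m(0, 1, 1): A returns 0, B raises ZeroDivisionError
import Mathlib
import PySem

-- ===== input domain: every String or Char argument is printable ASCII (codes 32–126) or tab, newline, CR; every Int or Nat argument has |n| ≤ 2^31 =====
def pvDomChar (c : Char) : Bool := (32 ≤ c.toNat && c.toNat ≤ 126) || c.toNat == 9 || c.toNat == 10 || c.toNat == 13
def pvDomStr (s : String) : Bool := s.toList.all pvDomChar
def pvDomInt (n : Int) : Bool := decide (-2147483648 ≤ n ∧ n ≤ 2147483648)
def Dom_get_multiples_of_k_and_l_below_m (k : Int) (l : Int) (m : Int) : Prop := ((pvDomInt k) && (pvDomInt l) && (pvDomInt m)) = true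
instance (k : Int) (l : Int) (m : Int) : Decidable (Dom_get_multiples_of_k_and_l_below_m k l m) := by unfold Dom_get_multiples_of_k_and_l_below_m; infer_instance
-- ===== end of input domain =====

-- B replaces A's O(m) set-building scan by an O(1) inclusion-exclusion arithmetic-series formula.
-- Pre_ excludes k = 0 or l = 0: there A raises ZeroDivisionError whenever m ≥ 2 (and returns 0 only
-- on the degenerate empty range m ≤ 1), while B's closed form always divides by the modulus.


-- ===== PORT A =====
def get_multiples_of_x_below_y (x : Int) (y : Int) : PySem.Set Int :=
  (PySem.List.pyRange 1 y 1).foldl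
    (fun multiples i => if PySem.Int.mod i x = 0 then PySem.Set.add multiples i else multiples)
    PySem.Set.empty

def get_multiples_of_k_and_l_below_m (k : Int) (l : Int) (m : Int) : Int :=
  let mult_of_k := get_multiples_of_x_below_y k m
  let mult_of_l := get_multiples_of_x_below_y l m
  let all_multiples := PySem.Set.union mult_of_k mult_of_l
  all_multiples.foldl (fun result_sum item => result_sum + item) 0

-- ===== PORT B =====
-- termination helper for the Euclid while-loop (cited by name in decreasing_by)
theorem pvMod_natAbs_lt (g x : Int) (hx : x ≠ 0) : (PySem.Int.mod g x).natAbs < x.natAbs := by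
  rcases lt_or_gt_of_ne hx with h | h
  · have := PySem.Int.mod_neg_bounds g h
    omega
  · have h1 := PySem.Int.mod_nonneg g h
    have h2 := PySem.Int.mod_lt g h
    omega

-- 'g, x = a, b; while x: g, x = x, g % x'
def pvEuclid (g : Int) (x : Int) : Int :=
  if hx : x = 0 then g else pvEuclid x (PySem.Int.mod g x)
termination_by x.natAbs
decreasing_by exact pvMod_natAbs_lt g x hx

-- 'def tri(d): n = t // d; return d * n * (n + 1) // 2'
def pvTri (t : Int) (d : Int) : Int :=
  PySem.Int.floordiv (d * PySem.Int.floordiv t d * (PySem.Int.floordiv t d + 1)) 2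

def get_multiples_of_k_and_l_below_m_alt (k : Int) (l : Int) (m : Int) : Int :=
  let t := if m > 1 then m - 1 else 0
  let a := |k|
  let b := |l|
  let g := pvEuclid a b
  pvTri t a + pvTri t b - pvTri t (PySem.Int.floordiv (a * b) g)

-- ===== PRECONDITION & SPEC =====
-- Pre_ excludes k = 0 or l = 0: A raises ZeroDivisionError there whenever m ≥ 2, and the value 0 it
-- returns for m ≤ 1 is only the accident of an empty range; B's closed form divides by the modulus.
def Pre_get_multiples_of_k_and_l_below_m (k : Int) (l : Int) (m : Int) : Prop := k ≠ 0 ∧ l ≠ 0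
instance (k : Int) (l : Int) (m : Int) : Decidable (Pre_get_multiples_of_k_and_l_below_m k l m) := by unfold Pre_get_multiples_of_k_and_l_below_m; infer_instance

def pvWitness_get_multiples_of_k_and_l_below_m : Int × Int × Int := (3, 5, 10)

def Spec_get_multiples_of_k_and_l_below_m (k : Int) (l : Int) (m : Int) (out : Int) : Prop := out = get_multiples_of_k_and_l_below_m_alt k l m
instance (k : Int) (l : Int) (m : Int) (out : Int) : Decidable (Spec_get_multiples_of_k_and_l_below_m k l m out) := by unfold Spec_get_multiples_of_k_and_l_below_m; infer_instance

-- ===== CLAIM (what is proved, stated in full; the proofs are below) =====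
def Claim_equal_get_multiples_of_k_and_l_below_m : Prop := ∀ (k : Int) (l : Int) (m : Int), Dom_get_multiples_of_k_and_l_below_m k l m → Pre_get_multiples_of_k_and_l_below_m k l m → Spec_get_multiples_of_k_and_l_below_m k l m (get_multiples_of_k_and_l_below_m k l m)

-- ===== LEMMAS AND PROOFS =====

-- A's set-building fold over a duplicate-free list of fresh elements appends the filtered list.
theorem pv_fold_add_filter (p : Int → Prop) [DecidablePred p] :
    ∀ (L : List Int) (s : PySem.Set Int), L.Nodup → (∀ i ∈ L, i ∉ s) →
      L.foldl (fun t i => if p i then PySem.Set.add t i else t) s = s ++ L.filter (fun i => decide (p i)) := by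
  intro L
  induction L with
  | nil => intro s _ _; simp
  | cons h tl ih =>
    intro s hnd hfresh
    simp only [List.foldl_cons, List.filter_cons]
    by_cases hp : p h
    · rw [if_pos hp, PySem.Set.add_of_not_mem (hfresh h (by simp))]
      rw [ih (s ++ [h]) (List.Nodup.of_cons hnd) ?_]
      · simp [hp]
      · intro i hi
        simp only [List.mem_append, List.mem_singleton]
        rintro (h1 | rfl)
        · exact hfresh i (by simp [hi]) h1
        · exact (List.nodup_cons.mp hnd).1 hi
    · rw [if_neg hp, ih s (List.Nodup.of_cons hnd) (fun i hi => hfresh i (by simp [hi]))]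
      simp [hp]

-- A's mult_of_x set is just the filtered range (in order)
theorem pv_gm_eq (x y : Int) :
    get_multiples_of_x_below_y x y
      = (PySem.List.pyRange 1 y 1).filter (fun i => decide (x ∣ i)) := by
  unfold get_multiples_of_x_below_y
  rw [pv_fold_add_filter (fun i => PySem.Int.mod i x = 0) (PySem.List.pyRange 1 y 1)
        PySem.Set.empty (PySem.List.nodup_pyRange_one 1 y) (by intro i _ h; simp [PySem.Set.empty] at h)]
  have : PySem.Set.empty (α := Int) = [] := rfl
  rw [this, List.nil_append]
  exact List.filter_congr (fun i _ => by simp [PySem.Int.mod_eq_zero_iff_dvd])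

-- union of two A-built sets: keep s, then the members of t not in s, in order
theorem pv_union_eq_append (s t : PySem.Set Int) (ht : t.Nodup) :
    PySem.Set.union s t = s ++ t.filter (fun x => decide (x ∉ s)) := by
  unfold PySem.Set.union PySem.Set.update
  induction t generalizing s with
  | nil => simp
  | cons h tl ih =>
    simp only [List.foldl_cons, List.filter_cons]
    by_cases hm : h ∈ s
    · rw [PySem.Set.add_of_mem hm, ih s (List.Nodup.of_cons ht)]
      simp [hm]
    · rw [PySem.Set.add_of_not_mem hm, ih (s ++ [h]) (List.Nodup.of_cons ht)]
      have : tl.filter (fun x => decide (x ∉ s ++ [h])) = tl.filter (fun x => decide (x ∉ s)) := by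
        apply List.filter_congr
        intro x hx
        have : x ≠ h := fun e => (List.nodup_cons.mp ht).1 (e ▸ hx)
        simp [this]
      rw [this]
      simp [hm]

-- floor division: how y/d changes when y is decremented
theorem pv_ediv_pred (y d : Int) (hd : 0 < d) :
    (y - 1) / d = if d ∣ y then y / d - 1 else y / d := by
  by_cases hdv : d ∣ y
  · rw [if_pos hdv]
    obtain ⟨q, rfl⟩ := hdv
    rw [show d * q - 1 = (d - 1) + d * (q - 1) from by ring,
        Int.add_mul_ediv_left _ _ (by omega : d ≠ 0),
        Int.ediv_eq_zero_of_lt (by omega) (by omega),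
        Int.mul_ediv_cancel_left _ (by omega : d ≠ 0)]
    omega
  · rw [if_neg hdv]
    have h0 := Int.mul_ediv_add_emod y d
    have h1 := Int.emod_nonneg y (by omega : d ≠ 0)
    have h2 := Int.emod_lt_of_pos y hd
    have hr : y % d ≠ 0 := fun h => hdv (Int.dvd_of_emod_eq_zero h)
    rw [show y - 1 = (y % d - 1) + d * (y / d) from by linarith,
        Int.add_mul_ediv_left _ _ (by omega : d ≠ 0),
        Int.ediv_eq_zero_of_lt (by omega) (by omega)]
    omega

-- the triangle closed form absorbs one more term
theorem pv_tri_step (d y : Int) (hd : 0 < d) (hy : 1 ≤ y) :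
    pvTri y d = pvTri (y - 1) d + (if d ∣ y then y else 0) := by
  unfold pvTri
  rw [PySem.Int.floordiv_eq_ediv_of_pos hd, PySem.Int.floordiv_eq_ediv_of_pos hd,
      PySem.Int.floordiv_eq_ediv_of_pos (by omega : (0:Int) < 2),
      PySem.Int.floordiv_eq_ediv_of_pos (by omega : (0:Int) < 2)]
  set q := y / d with hq
  obtain ⟨w, hw⟩ := Int.even_mul_succ_self q
  obtain ⟨w', hw'⟩ := Int.even_mul_succ_self ((y - 1) / d)
  have e1 : d * q * (q + 1) = 2 * (d * w) := by rw [mul_assoc, hw]; ring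
  have e2 : d * ((y - 1) / d) * ((y - 1) / d + 1) = 2 * (d * w') := by rw [mul_assoc, hw']; ring
  rw [e1, e2, Int.mul_ediv_cancel_left _ (by omega : (2:Int) ≠ 0),
      Int.mul_ediv_cancel_left _ (by omega : (2:Int) ≠ 0)]
  rw [pv_ediv_pred y d hd] at hw'
  by_cases hdv : d ∣ y
  · rw [if_pos hdv]
    rw [if_pos hdv] at hw'
    have hy' : d * q = y := by rw [hq, mul_comm]; exact Int.ediv_mul_cancel hdv
    have h1 : w + w = q * (q + 1) := hw.symm
    have h2 : w' + w' = (q - 1) * (q - 1 + 1) := hw'.symm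
    have h1' : w + w = q * q + q := by linear_combination h1
    have h2' : w' + w' = q * q - q := by linear_combination h2
    have key : w = w' + q := by linarith
    rw [key, ← hy']; ring
  · rw [if_neg hdv]
    rw [if_neg hdv] at hw'
    have : w = w' := by linarith [hw, hw']
    rw [this]; ring

-- the sum of the multiples of d > 0 in [1, y) is exactly B's arithmetic-series formula
theorem pv_sum_pos (d : Int) (hd : 0 < d) :
    ∀ y : Int, 1 ≤ y →
      ((PySem.List.pyRange 1 y 1).filter (fun i => decide (d ∣ i))).sum = pvTri (y - 1) d := by
  intro y hy
  induction y, hy using Int.le_induction with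
  | base =>
    rw [PySem.List.pyRange_one_eq_nil (by omega)]
    unfold pvTri
    have h0 : PySem.Int.floordiv 0 d = 0 := by
      rw [PySem.Int.floordiv_eq_ediv_of_pos hd]; simp
    simp [h0]
  | succ n hn ih =>
    rw [PySem.List.pyRange_one_succ_right (by omega), List.filter_append, List.sum_append, ih]
    rw [show n + 1 - 1 = n from by ring, pv_tri_step d n hd hn]
    by_cases hdv : d ∣ n <;> simp [hdv]

theorem pv_sumdiv_closed (d : Int) (hd : 0 < d) (y : Int) :
    ((PySem.List.pyRange 1 y 1).filter (fun i => decide (d ∣ i))).sum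
      = pvTri (if y > 1 then y - 1 else 0) d := by
  by_cases hy : 1 < y
  · rw [if_pos hy]
    exact pv_sum_pos d hd y (by omega)
  · rw [if_neg hy, PySem.List.pyRange_one_eq_nil (by omega)]
    unfold pvTri
    have h0 : PySem.Int.floordiv 0 d = 0 := by
      rw [PySem.Int.floordiv_eq_ediv_of_pos hd]; simp
    simp [h0]

-- the while-loop computes gcd on nonnegative inputs
theorem pv_euclid_gcd_aux : ∀ (n : Nat) (a b : Int), b.natAbs ≤ n → 0 ≤ a → 0 ≤ b →
    pvEuclid a b = Int.gcd a b := by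
  intro n
  induction n with
  | zero =>
    intro a b hb ha _
    have hb0 : b = 0 := by omega
    rw [pvEuclid, dif_pos hb0, hb0]
    simp [Int.gcd, Int.natAbs_of_nonneg ha]
  | succ n ih =>
    intro a b hb ha hb0
    by_cases hz : b = 0
    · rw [pvEuclid, dif_pos hz, hz]
      simp [Int.gcd, Int.natAbs_of_nonneg ha]
    · have hbpos : 0 < b := lt_of_le_of_ne hb0 (Ne.symm hz)
      rw [pvEuclid, dif_neg hz]
      have hmod : PySem.Int.mod a b = a % b := PySem.Int.mod_eq_emod_of_pos hbpos
      have hlt := pvMod_natAbs_lt a b hz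
      rw [ih b (PySem.Int.mod a b) (by omega) hb0 (hmod ▸ Int.emod_nonneg a hz)]
      rw [hmod]
      have hNA : (a % b).natAbs = a.natAbs % b.natAbs := by
        rw [Int.natAbs_emod a hz, if_pos (Or.inl ha)]
      unfold Int.gcd
      rw [hNA, Nat.gcd_comm b.natAbs, ← Nat.gcd_rec, Nat.gcd_comm]

-- inclusion-exclusion over one list: filter pb splits by pa
theorem pv_filter_split (R : List Int) (pa pb : Int → Bool) :
    (R.filter pb).sum
      = (R.filter (fun i => pa i && pb i)).sum + (R.filter (fun i => pb i && !pa i)).sum := by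
  induction R with
  | nil => simp
  | cons h t ih =>
    simp only [List.filter_cons]
    cases hpa : pa h <;> cases hpb : pb h <;> simp [ih] <;> ring

theorem pv_main (k l m : Int) (hk : k ≠ 0) (hl : l ≠ 0) :
    get_multiples_of_k_and_l_below_m k l m = get_multiples_of_k_and_l_below_m_alt k l m := by
  have hka : (0:Int) < |k| := abs_pos.mpr hk
  have hla : (0:Int) < |l| := abs_pos.mpr hl
  have hgN : Int.gcd k l ≠ 0 := by
    simp [Int.gcd]
    omega
  -- B's lcm value
  have hgcd : pvEuclid |k| |l| = Int.gcd k l := by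
    rw [pv_euclid_gcd_aux (|l|).natAbs |k| |l| le_rfl (abs_nonneg k) (abs_nonneg l)]
    simp [Int.gcd, Int.natAbs_abs]
  have hlcm : PySem.Int.floordiv (|k| * |l|) (pvEuclid |k| |l|) = (Int.lcm k l : Int) := by
    rw [hgcd, PySem.Int.floordiv_eq_ediv_of_pos (by exact_mod_cast Nat.pos_of_ne_zero hgN)]
    have habs : |k| * |l| = ((k.natAbs * l.natAbs : Nat) : Int) := by
      push_cast
      rw [Int.abs_eq_natAbs, Int.abs_eq_natAbs]
    rw [habs, ← Int.gcd_mul_lcm k l]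
    push_cast
    rw [Int.mul_ediv_cancel_left _ (by exact_mod_cast hgN)]
  have hlcm_pos : (0:Int) < (Int.lcm k l : Int) := by
    have := Int.lcm_ne_zero hk hl
    exact_mod_cast Nat.pos_of_ne_zero this
  -- A as a sum over the filtered range
  rw [show get_multiples_of_k_and_l_below_m k l m
        = (PySem.Set.union (get_multiples_of_x_below_y k m) (get_multiples_of_x_below_y l m)).foldl
            (fun result_sum item => result_sum + item) 0 from rfl]
  rw [pv_gm_eq k m, pv_gm_eq l m]
  set R := PySem.List.pyRange 1 m 1 with hR
  have hnd : R.Nodup := PySem.List.nodup_pyRange_one 1 m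
  set Sk := R.filter (fun i => decide (k ∣ i)) with hSk
  set Sl := R.filter (fun i => decide (l ∣ i)) with hSl
  rw [pv_union_eq_append Sk Sl (hnd.filter _)]
  rw [← List.sum_eq_foldl, List.sum_append]
  -- the second summand: members of Sl not in Sk = multiples of l but not of k
  have hsecond : Sl.filter (fun x => decide (x ∉ Sk))
      = R.filter (fun i => decide (l ∣ i) && !decide (k ∣ i)) := by
    rw [hSl, List.filter_filter]
    apply List.filter_congr
    intro x hx
    have hxk : x ∉ Sk ↔ ¬ (k ∣ x) := by
      rw [hSk]
      simp [List.mem_filter, hx]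
    by_cases hkx : k ∣ x <;> by_cases hlx : l ∣ x <;> simp [hkx, hlx, hxk]
  rw [hsecond]
  -- inclusion-exclusion
  have hsplit := pv_filter_split R (fun i => decide (k ∣ i)) (fun i => decide (l ∣ i))
  -- intersection is the multiples of lcm
  have hinter : R.filter (fun i => decide (k ∣ i) && decide (l ∣ i))
      = R.filter (fun i => decide ((Int.lcm k l : Int) ∣ i)) := by
    apply List.filter_congr
    intro x _
    simp [Int.coe_lcm_dvd_iff]
  -- the absolute-value divisors of B
  have habsk : Sk = R.filter (fun i => decide (|k| ∣ i)) := by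
    rw [hSk]; apply List.filter_congr; intro x _; simp [abs_dvd]
  have habsl : Sl = R.filter (fun i => decide (|l| ∣ i)) := by
    rw [hSl]; apply List.filter_congr; intro x _; simp [abs_dvd]
  rw [hinter] at hsplit
  have hfinal : Sk.sum + (R.filter (fun i => decide (l ∣ i) && !decide (k ∣ i))).sum
      = Sk.sum + Sl.sum - (R.filter (fun i => decide ((Int.lcm k l : Int) ∣ i))).sum := by
    rw [← hSl] at hsplit
    omega
  rw [hfinal, habsk, habsl]
  -- B's side
  rw [show get_multiples_of_k_and_l_below_m_alt k l m
        = pvTri (if m > 1 then m - 1 else 0) |k| + pvTri (if m > 1 then m - 1 else 0) |l|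
            - pvTri (if m > 1 then m - 1 else 0) (PySem.Int.floordiv (|k| * |l|) (pvEuclid |k| |l|)) from rfl]
  rw [hlcm, hR]
  rw [pv_sumdiv_closed |k| hka m, pv_sumdiv_closed |l| hla m,
      pv_sumdiv_closed (Int.lcm k l : Int) hlcm_pos m]

-- ===== VERDICT (by name: the statement is the Claim_ definition above) =====
theorem get_multiples_of_k_and_l_below_m_spec : Claim_equal_get_multiples_of_k_and_l_below_m := by
  intro k l m _ hpre
  exact pv_main k l m hpre.1 hpre.2
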